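-- pv_equiv track=rewrite | github.com/pypi-data/pypi-mirror-403 | packages/kernels/kernels-0.12.1-py3-none-any.whl/kernels/doc.py | _extract_description_before_tags
-- ===== SOURCE A (Python) =====
-- def _extract_description_before_tags(docstring_mdx: str) -> str:
--     """Extract the description part of a docstring before any tags."""
--     params_pos = docstring_mdx.find("<parameters>")
--     returns_pos = docstring_mdx.find("<returns>")
--     returntype_pos = docstring_mdx.find("<returntype>")
--     positions = [pos for pos in [params_pos, returns_pos, returntype_pos] if pos != -1]
--
--     if positions:
--         first_tag_pos = min(positions)
--         return docstring_mdx[:first_tag_pos].strip()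
--     else:
--         return docstring_mdx.strip()
-- ===== SOURCE B (Python) =====
-- def _extract_description_before_tags(docstring_mdx: str) -> str:
--     """Extract the description part of a docstring before any tags."""
--     tags = ("<parameters>", "<returns>", "<returntype>")
--     for i in range(len(docstring_mdx)):
--         if docstring_mdx.startswith(tags, i):
--             return docstring_mdx[:i].strip()
--     return docstring_mdx.strip()
-- ===== Notes on version B (the rewrite author's own statement) =====
-- stated objective: alternative
-- what changed: Replaces the three separate find() scans, the list-of-positions filter and the min() reduction by a single left-to-right scan that stops at the first position where any of the three tags starts (str.startswith with a tuple).
import Mathlib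
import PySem

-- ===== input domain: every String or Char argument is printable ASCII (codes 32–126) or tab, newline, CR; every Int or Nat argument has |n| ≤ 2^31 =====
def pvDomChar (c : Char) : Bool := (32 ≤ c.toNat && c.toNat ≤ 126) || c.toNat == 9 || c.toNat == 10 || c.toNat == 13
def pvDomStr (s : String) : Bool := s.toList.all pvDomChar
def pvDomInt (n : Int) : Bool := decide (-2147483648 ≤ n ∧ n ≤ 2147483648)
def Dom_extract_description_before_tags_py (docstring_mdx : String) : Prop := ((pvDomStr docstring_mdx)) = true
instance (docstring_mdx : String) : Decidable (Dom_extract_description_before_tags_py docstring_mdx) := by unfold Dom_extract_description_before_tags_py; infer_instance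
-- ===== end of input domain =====

-- ===== PORT A =====
-- A: three separate first-occurrence scans, filter out the misses, slice at the minimum.
-- B: one left-to-right scan stopping at the first index where any tag starts.
def extract_description_before_tags_py (docstring_mdx : String) : String :=
  let cs := docstring_mdx.toList
  let params_pos := PySem.Chars.find cs "<parameters>".toList
  let returns_pos := PySem.Chars.find cs "<returns>".toList
  let returntype_pos := PySem.Chars.find cs "<returntype>".toList
  let positions := [params_pos, returns_pos, returntype_pos].filter (fun p => p ≠ -1)
  match PySem.List.min? positions (fun x => x) with
  | some first_tag_pos =>
      String.ofList (PySem.Chars.strip (PySem.List.slice cs none (some first_tag_pos)))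
  | none => String.ofList (PySem.Chars.strip cs)

-- ===== PORT B =====
def pvTags : List (List Char) := ["<parameters>".toList, "<returns>".toList, "<returntype>".toList]

-- single scan: first index where some tag is a prefix of the remaining suffix
def firstTagIdx : List Char → Option Nat
  | [] => none
  | c :: rest =>
    if pvTags.any (fun t => t.isPrefixOf (c :: rest)) then some 0
    else (firstTagIdx rest).map (· + 1)

def extract_description_before_tags_py_alt (docstring_mdx : String) : String :=
  let cs := docstring_mdx.toList
  match firstTagIdx cs with
  | some i => String.ofList (PySem.Chars.strip (cs.take i))
  | none => String.ofList (PySem.Chars.strip cs)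

-- ===== PRECONDITION & SPEC =====
def Spec_extract_description_before_tags_py (docstring_mdx : String) (out : String) : Prop := out = extract_description_before_tags_py_alt docstring_mdx
instance (docstring_mdx : String) (out : String) : Decidable (Spec_extract_description_before_tags_py docstring_mdx out) := by unfold Spec_extract_description_before_tags_py; infer_instance

-- ===== CLAIM (what is proved, stated in full; the proofs are below) =====
def Claim_equal_extract_description_before_tags_py : Prop := ∀ (docstring_mdx : String), Dom_extract_description_before_tags_py docstring_mdx → Spec_extract_description_before_tags_py docstring_mdx (extract_description_before_tags_py docstring_mdx)

-- ===== LEMMAS AND PROOFS =====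

theorem firstTagIdx_none_spec (cs : List Char) (h : firstTagIdx cs = none) :
    ∀ i, ¬ ∃ t ∈ pvTags, t <+: cs.drop i := by
  induction cs with
  | nil =>
    intro i ⟨t, ht, hp⟩
    simp at hp
    subst hp
    exact absurd ht (by decide)
  | cons c rest ih =>
    intro i
    simp only [firstTagIdx] at h
    split at h
    · exact absurd h (by simp)
    · rename_i hguard
      match i with
      | 0 =>
        intro ⟨t, ht, hp⟩
        exact hguard (List.any_eq_true.mpr ⟨t, ht, List.isPrefixOf_iff_prefix.mpr hp⟩)
      | Nat.succ j =>
        simpa using ih (by simpa using h) j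

theorem firstTagIdx_some_spec (cs : List Char) (n : Nat) (h : firstTagIdx cs = some n) :
    (∃ t ∈ pvTags, t <+: cs.drop n) ∧ ∀ i < n, ¬ ∃ t ∈ pvTags, t <+: cs.drop i := by
  induction cs generalizing n with
  | nil => simp [firstTagIdx] at h
  | cons c rest ih =>
    simp only [firstTagIdx] at h
    split at h
    · rename_i hguard
      obtain ⟨t, ht, hp⟩ := List.any_eq_true.mp hguard
      obtain rfl : n = 0 := by simpa using h.symm
      exact ⟨⟨t, ht, List.isPrefixOf_iff_prefix.mp hp⟩, by omega⟩
    · rename_i hguard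
      cases hr : firstTagIdx rest with
      | none => rw [hr] at h; simp at h
      | some m =>
        rw [hr] at h
        simp at h
        obtain rfl := h.symm
        obtain ⟨h1, h2⟩ := ih m hr
        refine ⟨by simpa using h1, ?_⟩
        intro i hi
        match i with
        | 0 =>
          intro ⟨t, ht, hp⟩
          exact hguard (List.any_eq_true.mpr ⟨t, ht, List.isPrefixOf_iff_prefix.mpr hp⟩)
        | Nat.succ j => simpa using h2 j (by omega)

-- a tag that occurs nowhere has find = -1
theorem find_eq_neg_one_of_nowhere (cs t : List Char)
    (h : ∀ i, ¬ t <+: cs.drop i) : PySem.Chars.find cs t = -1 := by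
  rw [PySem.Chars.find_eq_neg_one_iff]
  intro hinf
  obtain ⟨j, hj⟩ := (PySem.Chars.exists_prefix_drop_iff_isIn t cs).mpr
    ((PySem.Chars.isIn_iff_infix t cs).mpr hinf)
  exact h j hj

-- a find that hits is at least the first index where ANY tag occurs
theorem le_find_of_none_before (cs t : List Char) (n : Nat)
    (hbefore : ∀ i < n, ¬ t <+: cs.drop i)
    (hne : PySem.Chars.find cs t ≠ -1) : (n : Int) ≤ PySem.Chars.find cs t := by
  have hnn : 0 ≤ PySem.Chars.find cs t := by
    have := PySem.Chars.neg_one_le_find cs t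
    omega
  obtain ⟨hpre, _⟩ := PySem.Chars.find_spec hnn
  by_contra hlt
  exact hbefore _ (by omega) hpre

-- a tag occurring at index n has 0 ≤ find ≤ n
theorem find_le_of_prefix_at (cs t : List Char) (n : Nat)
    (hp : t <+: cs.drop n) : PySem.Chars.find cs t ≤ (n : Int) ∧ 0 ≤ PySem.Chars.find cs t := by
  have hnn : 0 ≤ PySem.Chars.find cs t := by
    rw [PySem.Chars.find_nonneg_iff]
    exact (PySem.Chars.isIn_iff_infix t cs).mp
      ((PySem.Chars.exists_prefix_drop_iff_isIn t cs).mp ⟨n, hp⟩)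
  obtain ⟨_, hmin⟩ := PySem.Chars.find_spec hnn
  refine ⟨?_, hnn⟩
  by_contra hgt
  exact hmin n (by omega) hp

-- ===== VERDICT (by name: the statement is the Claim_ definition above) =====
theorem extract_description_before_tags_py_spec : Claim_equal_extract_description_before_tags_py := by
  intro s _
  show extract_description_before_tags_py s = extract_description_before_tags_py_alt s
  unfold extract_description_before_tags_py extract_description_before_tags_py_alt
  simp only []
  set cs := s.toList with hcs
  cases hft : firstTagIdx cs with
  | none =>
    have hall := firstTagIdx_none_spec cs hft
    have h1 : PySem.Chars.find cs "<parameters>".toList = -1 :=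
      find_eq_neg_one_of_nowhere cs _ (fun i hp => hall i ⟨_, by decide, hp⟩)
    have h2 : PySem.Chars.find cs "<returns>".toList = -1 :=
      find_eq_neg_one_of_nowhere cs _ (fun i hp => hall i ⟨_, by decide, hp⟩)
    have h3 : PySem.Chars.find cs "<returntype>".toList = -1 :=
      find_eq_neg_one_of_nowhere cs _ (fun i hp => hall i ⟨_, by decide, hp⟩)
    rw [h1, h2, h3]
    simp [List.filter, PySem.List.min?]
  | some n =>
    obtain ⟨⟨tstar, htstar, hpstar⟩, hmin⟩ := firstTagIdx_some_spec cs n hft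
    -- every tag's successful find is at least n
    have hge : ∀ t ∈ pvTags, PySem.Chars.find cs t ≠ -1 → (n : Int) ≤ PySem.Chars.find cs t := by
      intro t ht hne
      exact le_find_of_none_before cs t n (fun i hi hp => hmin i hi ⟨t, ht, hp⟩) hne
    -- the witness tag's find is exactly n
    have hstar : PySem.Chars.find cs tstar = (n : Int) := by
      obtain ⟨hle, hnn⟩ := find_le_of_prefix_at cs tstar n hpstar
      have hge' := hge tstar htstar (by omega)
      omega
    -- n is one of the three positions
    have hmem : (n : Int) ∈ [PySem.Chars.find cs "<parameters>".toList,
        PySem.Chars.find cs "<returns>".toList, PySem.Chars.find cs "<returntype>".toList] := by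
      have hcases : tstar = "<parameters>".toList ∨ tstar = "<returns>".toList ∨
          tstar = "<returntype>".toList := by
        simpa [pvTags] using htstar
      simp only [List.mem_cons, List.not_mem_nil, or_false]
      rcases hcases with rfl | rfl | rfl
      · exact Or.inl hstar.symm
      · exact Or.inr (Or.inl hstar.symm)
      · exact Or.inr (Or.inr hstar.symm)
    have hmemf : (n : Int) ∈ ([PySem.Chars.find cs "<parameters>".toList,
        PySem.Chars.find cs "<returns>".toList,
        PySem.Chars.find cs "<returntype>".toList].filter (fun p => p ≠ -1)) := by
      rw [List.mem_filter]
      exact ⟨hmem, decide_eq_true (by omega)⟩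
    cases hm : PySem.List.min? ([PySem.Chars.find cs "<parameters>".toList,
        PySem.Chars.find cs "<returns>".toList,
        PySem.Chars.find cs "<returntype>".toList].filter (fun p => p ≠ -1)) (fun x => x) with
    | none =>
      rw [PySem.List.min?_eq_none_iff] at hm
      rw [hm] at hmemf
      simp at hmemf
    | some m =>
      have hmle : m ≤ (n : Int) := PySem.List.min?_isMin hm _ hmemf
      have hmm := PySem.List.min?_mem hm
      rw [List.mem_filter] at hmm
      obtain ⟨hmm3, hmne⟩ := hmm
      have hne : m ≠ -1 := of_decide_eq_true hmne
      have hnle : (n : Int) ≤ m := by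
        simp only [List.mem_cons, List.not_mem_nil, or_false] at hmm3
        rcases hmm3 with rfl | rfl | rfl
        · exact hge _ (by decide) hne
        · exact hge _ (by decide) hne
        · exact hge _ (by decide) hne
      have hmn : m = (n : Int) := le_antisymm hmle hnle
      subst hmn
      simp [PySem.List.slice_to cs (show (0:Int) ≤ ((n : Nat) : Int) from by omega)]
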